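-- pv_equiv track=rewrite | github.com/cornell-zhang/allo | allo/backend/xls.py | _preprocess_cpp
-- ===== SOURCE A (Python) =====
-- def _preprocess_cpp(code):
--     lines = []
--     all_lines = code.split("\n")
--     skip_next = False
--     for i, line in enumerate(all_lines):
--         if skip_next:
--             skip_next = False
--             continue
--         # Skip XLS-specific includes
--         if "#include" in line and (
--             "xls" in line.lower() or "ac_int" in line or "ac_channel" in line
--         ):
--             continue
--         # Skip template line if next line is using ac_int (they come as a pair)
--         if line.strip().startswith("template") and i + 1 < len(all_lines):
--             next_line = all_lines[i + 1]
--             if "using ac_int" in next_line or "using ac_uint" in next_line: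
--                 skip_next = True
--                 continue
--         # Skip using ac_int/ac_uint lines
--         if "using ac_int" in line or "using ac_uint" in line:
--             continue
--         lines.append(line)
--     return "\n".join(lines)
-- ===== SOURCE B (Python) =====
-- def _preprocess_cpp(code):
--     result = []
--     next_uses = False  # does the line following the current one use ac_int/ac_uint?
--     for line in reversed(code.split("\n")):
--         uses = "using ac_int" in line or "using ac_uint" in line
--         drop = (
--             ("#include" in line and (
--                 "xls" in line.lower() or "ac_int" in line or "ac_channel" in line
--             ))
--             or uses
--             or (next_uses and line.strip().startswith("template"))
--         )
--         if not drop: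
--             result.append(line)
--         next_uses = uses
--     return "\n".join(reversed(result))
-- ===== Notes on version B (the rewrite author's own statement) =====
-- stated objective: alternative
-- what changed: Replaced the forward indexed scan carrying a skip_next flag (with an all_lines[i+1] lookahead) by a single backward traversal that builds the kept lines back-to-front, carrying only whether the already-processed following line is a 'using ac_int/ac_uint' declaration; the skip flag and index lookahead disappear.
import Mathlib
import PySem

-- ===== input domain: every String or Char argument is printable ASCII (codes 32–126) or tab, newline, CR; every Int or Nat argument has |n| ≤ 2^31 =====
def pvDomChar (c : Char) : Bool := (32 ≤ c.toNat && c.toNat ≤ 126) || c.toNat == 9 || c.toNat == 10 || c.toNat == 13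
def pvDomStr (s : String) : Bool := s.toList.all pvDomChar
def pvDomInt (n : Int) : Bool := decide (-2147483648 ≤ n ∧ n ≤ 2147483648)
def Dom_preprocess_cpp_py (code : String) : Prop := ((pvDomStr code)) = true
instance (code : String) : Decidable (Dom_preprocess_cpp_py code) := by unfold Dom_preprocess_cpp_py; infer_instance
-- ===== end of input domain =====

-- B replaces A's forward scan with a skip_next flag and index lookahead by a backward
-- traversal building the kept lines back-to-front, carrying only whether the following
-- (already-processed) line is a 'using ac_*' declaration (objective: alternative).

-- line predicates (literal transcriptions of the identical Python conditions)
def pvIncl (line : String) : Bool :=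
  PySem.Str.isIn "#include" line &&
    (PySem.Str.isIn "xls" (PySem.Str.lower line) || PySem.Str.isIn "ac_int" line ||
      PySem.Str.isIn "ac_channel" line)

def pvTempl (line : String) : Bool :=
  PySem.Str.startswith (PySem.Str.strip line) "template"

def pvUses (line : String) : Bool :=
  PySem.Str.isIn "using ac_int" line || PySem.Str.isIn "using ac_uint" line

-- ===== PORT A =====
-- "i+1 < len(all_lines) and ('using ac_int' in all_lines[i+1] or ...)": the next line is the head of the remaining tail
def pvNextUses : List String → Bool
  | [] => false
  | n :: _ => pvUses n

-- A's loop: structural recursion over the remaining lines carrying the skip_next flag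
def pvAGo : Bool → List String → List String
  | _, [] => []
  | true, _ :: rest => pvAGo false rest
  | false, line :: rest =>
      if pvIncl line then pvAGo false rest
      else if pvTempl line && pvNextUses rest then pvAGo true rest
      else if pvUses line then pvAGo false rest
      else line :: pvAGo false rest

def preprocess_cpp_py (code : String) : String :=
  PySem.Str.join "\n" (pvAGo false ((PySem.Str.split? code "\n").getD []))

-- ===== PORT B =====
-- one step of B's backward loop: state = (result so far, next_uses)
def pvBStep (st : List String × Bool) (line : String) : List String × Bool :=
  let uses := pvUses line
  let drop := pvIncl line || uses || (st.2 && pvTempl line)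
  ((if drop then st.1 else st.1 ++ [line]), uses)

def preprocess_cpp_py_alt (code : String) : String :=
  PySem.Str.join "\n"
    ((((PySem.Str.split? code "\n").getD []).reverse.foldl pvBStep ([], false)).1.reverse)

-- ===== PRECONDITION & SPEC =====
def Spec_preprocess_cpp_py (code : String) (out : String) : Prop := out = preprocess_cpp_py_alt code
instance (code : String) (out : String) : Decidable (Spec_preprocess_cpp_py code out) := by unfold Spec_preprocess_cpp_py; infer_instance

-- ===== CLAIM (what is proved, stated in full; the proofs are below) =====
def Claim_equal_preprocess_cpp_py : Prop := ∀ (code : String), Dom_preprocess_cpp_py code → Spec_preprocess_cpp_py code (preprocess_cpp_py code)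

-- ===== LEMMAS AND PROOFS =====

-- common stateless characterisation: keep a line unless its own rules or the template+next-uses pair rule drop it
def pvBK : List String → List String
  | [] => []
  | x :: rest =>
      if pvIncl x || pvUses x || (pvNextUses rest && pvTempl x) then pvBK rest
      else x :: pvBK rest

lemma pvFold_eq (all : List String) :
    all.reverse.foldl pvBStep ([], false) = ((pvBK all).reverse, pvNextUses all) := by
  induction all with
  | nil => rfl
  | cons x rest ih =>
      rw [List.reverse_cons, List.foldl_append, ih]
      simp only [List.foldl_cons, List.foldl_nil, pvBStep, pvBK]
      cases h : (pvIncl x || pvUses x || (pvNextUses rest && pvTempl x)) <;>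
        simp [pvNextUses]

lemma pvAGo_eq_pvBK : ∀ (fuel : Nat) (all : List String), all.length ≤ fuel →
    pvAGo false all = pvBK all := by
  intro fuel
  induction fuel with
  | zero =>
      intro all h
      have : all = [] := List.eq_nil_of_length_eq_zero (Nat.le_zero.mp h)
      simp [this, pvAGo, pvBK]
  | succ n ih =>
      intro all h
      match all with
      | [] => rfl
      | line :: rest =>
        simp only [List.length_cons, Nat.succ_le_succ_iff] at h
        cases rest with
        | nil =>
            by_cases hincl : pvIncl line <;> by_cases huse : pvUses line <;>
              simp [pvAGo, pvBK, pvNextUses, hincl, huse]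
        | cons n0 rest' =>
            by_cases hincl : pvIncl line
            · have hA : pvAGo false (line :: n0 :: rest') = pvAGo false (n0 :: rest') := by
                simp [pvAGo, hincl]
              have hB : pvBK (line :: n0 :: rest') = pvBK (n0 :: rest') := by
                simp [pvBK, hincl]
              rw [hA, hB]; exact ih _ h
            · by_cases htn : pvTempl line && pvUses n0
              · have hu0 : pvUses n0 = true := Bool.and_elim_right htn
                have ht0 : pvTempl line = true := Bool.and_elim_left htn
                have hr' : rest'.length ≤ n := Nat.le_of_succ_le h
                have hA : pvAGo false (line :: n0 :: rest') = pvAGo false rest' := by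
                  simp [pvAGo, hincl, ht0, pvNextUses, hu0]
                have hB : pvBK (line :: n0 :: rest') = pvBK rest' := by
                  simp [pvBK, pvNextUses, ht0, hu0]
                rw [hA, hB]; exact ih _ hr'
              · by_cases huse : pvUses line
                · have hA : pvAGo false (line :: n0 :: rest') = pvAGo false (n0 :: rest') := by
                    simp [pvAGo, hincl, pvNextUses, htn, huse]
                  have hB : pvBK (line :: n0 :: rest') = pvBK (n0 :: rest') := by
                    simp [pvBK, huse]
                  rw [hA, hB]; exact ih _ h
                · have hA : pvAGo false (line :: n0 :: rest') = line :: pvAGo false (n0 :: rest') := by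
                    simp [pvAGo, hincl, pvNextUses, htn, huse]
                  have hB : pvBK (line :: n0 :: rest') = line :: pvBK (n0 :: rest') := by
                    have hd : (pvIncl line || pvUses line || (pvNextUses (n0 :: rest') && pvTempl line)) = false := by
                      simp only [hincl, huse, pvNextUses, Bool.false_or]
                      simpa [Bool.and_comm] using htn
                    simp [pvBK, hd]
                  rw [hA, hB, ih _ h]
-- ===== VERDICT (by name: the statement is the Claim_ definition above) =====
theorem preprocess_cpp_py_spec : Claim_equal_preprocess_cpp_py := by
  intro code _
  unfold Spec_preprocess_cpp_py preprocess_cpp_py preprocess_cpp_py_alt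
  rw [pvFold_eq, pvAGo_eq_pvBK ((PySem.Str.split? code "\n").getD []).length _ le_rfl,
    List.reverse_reverse]
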